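-- pv_equiv track=rewrite | github.com/cmbz/hl-saef | src/report.py | get_datafile_categories
-- ===== SOURCE A (Python) =====
-- def get_datafile_categories(categories):
--     ret = {}
--     if (not categories):
--         return ret
--     for category in categories:
--         tokens = category.split(':')
--         # if the category doesn't have a colon (e.g., Data or Documentation)
--         if (tokens[0] == category):
--             cat = category
--             val = 'True'
--         else:
--             cat = tokens[0]
--             val = tokens[1]
--         if (not ret.get(cat)):
--             ret[cat] = []
--         ret[cat].append(val)
--
--     for key in ret.keys():
--         value = ret.get(key)
--         ret[key] = ';'.join(value)
--     return ret
-- ===== SOURCE B (Python) =====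
-- def get_datafile_categories(categories):
--     ret = {}
--     for category in categories:
--         tokens = category.split(':')
--         if tokens[0] == category:
--             cat, val = category, 'True'
--         else:
--             cat, val = tokens[0], tokens[1]
--         if cat in ret:
--             ret[cat] = ret[cat] + ';' + val
--         else:
--             ret[cat] = val
--     return ret
-- ===== Notes on version B (the rewrite author's own statement) =====
-- stated objective: simpler
-- what changed: Single pass that maintains the final joined string per key directly in the result dict (appending ';'+val on repeat keys), replacing A's two-phase grouping into lists followed by a join-over-keys pass; the early empty-input return also disappears.
import Mathlib
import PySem

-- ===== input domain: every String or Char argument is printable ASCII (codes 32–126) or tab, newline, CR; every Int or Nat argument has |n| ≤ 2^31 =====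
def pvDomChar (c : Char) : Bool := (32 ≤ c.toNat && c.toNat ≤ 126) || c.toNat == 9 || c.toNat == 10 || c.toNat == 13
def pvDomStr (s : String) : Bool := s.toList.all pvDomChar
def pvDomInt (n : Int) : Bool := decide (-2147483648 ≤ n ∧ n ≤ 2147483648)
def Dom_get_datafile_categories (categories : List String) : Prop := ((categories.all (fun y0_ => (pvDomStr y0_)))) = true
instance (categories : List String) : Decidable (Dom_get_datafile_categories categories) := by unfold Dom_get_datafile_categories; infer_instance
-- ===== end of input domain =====

-- ===== PORT A =====
-- B replaces A's two-phase build (group values into lists, then join over keys) by one pass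
-- keeping the joined string per key; return values proved equal (objective: simpler).
def get_datafile_categories (categories : List String) : List (String × String) :=
  let ret : PySem.Dict String (List String) := PySem.Dict.empty
  if categories = [] then ([] : List (String × String))   -- 'return ret' with ret still {}
  else
    let ret := categories.foldl (fun ret category =>
      let tokens := (PySem.Str.split? category ":").getD []   -- sep ":" ≠ "", so never none
      let cat := if tokens.getD 0 "" = category then category else tokens.getD 0 ""
      let val := if tokens.getD 0 "" = category then "True" else tokens.getD 1 ""
      let ret := if (ret.get? cat).getD [] = [] then ret.insert cat ([] : List String) else ret
      ret.modify cat [] (fun l => l ++ [val])) ret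
    -- 'for key in ret.keys(): ret[key] = ";".join(ret[key])': the value type changes from
    -- list to str, so the in-place loop is ported as a loop emitting the joined items in order
    ret.items.foldl (fun acc kv => acc ++ [(kv.1, PySem.Str.join ";" kv.2)]) []

-- ===== PORT B =====
def get_datafile_categories_alt (categories : List String) : List (String × String) :=
  (categories.foldl (fun (ret : PySem.Dict String String) category =>
    let tokens := (PySem.Str.split? category ":").getD []
    let cat := if tokens.getD 0 "" = category then category else tokens.getD 0 ""
    let val := if tokens.getD 0 "" = category then "True" else tokens.getD 1 ""
    if ret.contains cat then ret.insert cat (ret.getD cat "" ++ ";" ++ val)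
    else ret.insert cat val) PySem.Dict.empty).items

-- ===== PRECONDITION & SPEC =====
def Spec_get_datafile_categories (categories : List String) (out : List (String × String)) : Prop := out = get_datafile_categories_alt categories
instance (categories : List String) (out : List (String × String)) : Decidable (Spec_get_datafile_categories categories out) := by unfold Spec_get_datafile_categories; infer_instance

-- ===== CLAIM (what is proved, stated in full; the proofs are below) =====
def Claim_equal_get_datafile_categories : Prop := ∀ (categories : List String), Dom_get_datafile_categories categories → Spec_get_datafile_categories categories (get_datafile_categories categories)

-- ===== LEMMAS AND PROOFS =====

-- ";".join of a one-element list is that element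
lemma join_semi_singleton (v : String) : PySem.Str.join ";" [v] = v := by
  simp [PySem.Str.join, PySem.Chars.join_singleton]

-- ";".join over a nonempty list, extended by one element
lemma chars_join_append (v : List Char) : ∀ (l : List (List Char)), l ≠ [] →
    PySem.Chars.join [';'] (l ++ [v]) = PySem.Chars.join [';'] l ++ [';'] ++ v
  | [], h => absurd rfl h
  | [a], _ => by
      rw [List.singleton_append, PySem.Chars.join_cons_cons, PySem.Chars.join_singleton,
        PySem.Chars.join_singleton]
  | a :: b :: rest, _ => by
      have ih := chars_join_append v (b :: rest) (by simp)
      simp only [List.cons_append] at ih ⊢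
      rw [PySem.Chars.join_cons_cons, ih, PySem.Chars.join_cons_cons]
      simp [List.append_assoc]

lemma join_semi_append (l : List String) (hl : l ≠ []) (v : String) :
    PySem.Str.join ";" (l ++ [v]) = PySem.Str.join ";" l ++ ";" ++ v := by
  have h1 : (";" : String).toList = [';'] := rfl
  have h2 := chars_join_append v.toList (l.map String.toList) (by simpa using hl)
  simp only [PySem.Str.join, List.map_append, List.map_cons, List.map_nil, h1, h2]
  simp only [String.ofList_append, String.append_assoc, String.ofList_toList]

-- A's per-category dict step
def stepA (d : PySem.Dict String (List String)) (cat val : String) :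
    PySem.Dict String (List String) :=
  (if (d.get? cat).getD [] = [] then d.insert cat ([] : List String) else d).modify cat []
    (fun l => l ++ [val])

-- B's per-category dict step
def stepB (d : PySem.Dict String String) (cat val : String) : PySem.Dict String String :=
  if d.contains cat then d.insert cat (d.getD cat "" ++ ";" ++ val) else d.insert cat val

-- the invariant linking the two loop states
def DJInv (dA : PySem.Dict String (List String)) (dB : PySem.Dict String String) : Prop :=
  dB.items = dA.items.map (fun kv => (kv.1, PySem.Str.join ";" kv.2)) ∧
    ∀ kv ∈ dA.items, kv.2 ≠ ([] : List String)

-- B's membership test agrees with A's (the keys are the same list)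
lemma contains_of_inv (dA : PySem.Dict String (List String)) (dB : PySem.Dict String String)
    (h : DJInv dA dB) (cat : String) : dB.contains cat = dA.contains cat := by
  simp [PySem.Dict.contains, h.1, List.any_map, Function.comp_def]

lemma inv_step (dA : PySem.Dict String (List String)) (dB : PySem.Dict String String)
    (h : DJInv dA dB) (cat val : String) : DJInv (stepA dA cat val) (stepB dB cat val) := by
  obtain ⟨hmap, hne⟩ := h
  have hcB := contains_of_inv dA dB ⟨hmap, hne⟩ cat
  by_cases hc : dA.contains cat = true
  · -- cat already present; its first stored value q.2 is nonempty
    obtain ⟨p, hp, hpk⟩ : ∃ p ∈ dA.items, p.1 == cat := by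
      simpa [PySem.Dict.contains, List.any_eq_true] using hc
    obtain ⟨q, hqf⟩ : ∃ q, dA.items.find? (fun p => p.1 == cat) = some q :=
      Option.isSome_iff_exists.mp (List.find?_isSome.mpr ⟨p, hp, hpk⟩)
    have hqmem := List.mem_of_find?_eq_some hqf
    have hqne : q.2 ≠ [] := hne q hqmem
    have hgetA : dA.get? cat = some q.2 := by simp [PySem.Dict.get?, hqf]
    have hfindB : dB.items.find? (fun p => p.1 == cat) =
        some (q.1, PySem.Str.join ";" q.2) := by
      rw [hmap, List.find?_map]
      simp [Function.comp_def, hqf]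
    have hgetB : dB.getD cat "" = PySem.Str.join ";" q.2 := by
      simp [PySem.Dict.getD, PySem.Dict.get?, hfindB]
    have hstepA : (stepA dA cat val).items =
        dA.items.map (fun p => if p.1 == cat then (cat, q.2 ++ [val]) else p) := by
      simp [stepA, PySem.Dict.modify, PySem.Dict.getD, hgetA, hqne, PySem.Dict.insert, hc]
    have hstepB : (stepB dB cat val).items =
        dB.items.map (fun p =>
          if p.1 == cat then (cat, PySem.Str.join ";" q.2 ++ ";" ++ val) else p) := by
      have hcB' : dB.contains cat = true := hcB.trans hc
      simp [stepB, hcB', hgetB, PySem.Dict.insert]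
    constructor
    · rw [hstepB, hstepA, hmap, List.map_map, List.map_map]
      refine List.map_congr_left (fun kv _ => ?_)
      simp only [Function.comp_def]
      by_cases hk : kv.1 = cat
      · simp [hk, join_semi_append q.2 hqne val]
      · simp [hk]
    · intro kv hkv
      rw [hstepA] at hkv
      obtain ⟨r, hr, hrkv⟩ := List.mem_map.mp hkv
      by_cases hk : r.1 = cat
      · simp only [hk, beq_self_eq_true, if_true] at hrkv
        rw [← hrkv]
        simp
      · simp [hk] at hrkv
        exact hrkv ▸ hne r hr
  · -- cat unseen: both append a fresh entry at the end
    have hcf : dA.contains cat = false := by simpa using hc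
    have hnotk : ∀ p ∈ dA.items, p.1 ≠ cat := by
      intro r hr hk
      exact hc (List.any_eq_true.mpr ⟨r, hr, by simpa using hk⟩)
    have hfindA : dA.items.find? (fun p => p.1 == cat) = none :=
      List.find?_eq_none.mpr (fun r hr => by simp [hnotk r hr])
    have hfront : dA.items.map
        (fun p => if p.1 = cat then (cat, [val]) else p) = dA.items := by
      conv_rhs => rw [← List.map_id dA.items]
      exact List.map_congr_left (fun r hr => by simp [hnotk r hr])
    have hany : (dA.items.any fun p => p.1 == cat) = false := hcf
    have hstepA : (stepA dA cat val).items = dA.items ++ [(cat, [val])] := by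
      simp [stepA, PySem.Dict.modify, PySem.Dict.insert, PySem.Dict.contains,
        hany, PySem.Dict.getD, PySem.Dict.get?, List.find?_append, hfindA,
        List.any_append, List.map_append, hfront]
    have hstepB : (stepB dB cat val).items = dB.items ++ [(cat, val)] := by
      have hcB' : dB.contains cat = false := hcB.trans hcf
      simp [stepB, hcB', PySem.Dict.insert]
    constructor
    · rw [hstepB, hstepA, hmap, List.map_append]
      simp [join_semi_singleton]
    · intro kv hkv
      rw [hstepA] at hkv
      rcases List.mem_append.mp hkv with hkv | hkv
      · exact hne kv hkv
      · simp only [List.mem_singleton] at hkv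
        simp [hkv]


lemma inv_fold (categories : List String) (dA : PySem.Dict String (List String))
    (dB : PySem.Dict String String) (h : DJInv dA dB) :
    DJInv (categories.foldl (fun (ret : PySem.Dict String (List String)) category =>
          let tokens := (PySem.Str.split? category ":").getD []
          let cat := if tokens.getD 0 "" = category then category else tokens.getD 0 ""
          let val := if tokens.getD 0 "" = category then "True" else tokens.getD 1 ""
          let ret := if (ret.get? cat).getD [] = [] then ret.insert cat ([] : List String) else ret
          ret.modify cat [] (fun l => l ++ [val])) dA)
        (categories.foldl (fun (ret : PySem.Dict String String) category =>
          let tokens := (PySem.Str.split? category ":").getD []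
          let cat := if tokens.getD 0 "" = category then category else tokens.getD 0 ""
          let val := if tokens.getD 0 "" = category then "True" else tokens.getD 1 ""
          if ret.contains cat then ret.insert cat (ret.getD cat "" ++ ";" ++ val)
          else ret.insert cat val) dB) := by
  induction categories generalizing dA dB with
  | nil => exact h
  | cons c cs ih =>
      simp only [List.foldl_cons]
      exact ih _ _ (inv_step dA dB h _ _)

-- ===== VERDICT (by name: the statement is the Claim_ definition above) =====
theorem get_datafile_categories_spec : Claim_equal_get_datafile_categories := by
  intro categories _
  unfold Spec_get_datafile_categories get_datafile_categories get_datafile_categories_alt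
  have hinv := inv_fold categories PySem.Dict.empty PySem.Dict.empty
    ⟨rfl, by simp [PySem.Dict.empty]⟩
  by_cases hnil : categories = []
  · subst hnil; rfl
  · simp only [hnil, if_false]
    rw [PySem.List.foldl_append_singleton_eq_map]
    exact hinv.1.symm
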